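-- pv_equiv track=rewrite | github.com/qpalzmz112/Advent-of-Code | 2024/Day 11/part1.py | update_stone_iter
-- ===== SOURCE A (Python) =====
-- def update_stone(stone):
--     if stone == '0':
--         return ['1']
--     elif len(stone) % 2 == 0:
--         # omit leading 0s, e.g., 1000 -> 10, 0
--         mid = len(stone) // 2
--         first_half = stone[:mid]
--         second_half = stone[mid:]
--         while len(second_half) > 1 and second_half[0] == '0':
--             second_half = second_half[1:]
--         return [first_half, second_half]
--     else:
--         return [str(int(stone) * 2024)]
--
-- def update_stone_iter(stone, blinks):
--     curr_stones = [stone]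
--     for _ in range(blinks):
--         new_stones = []
--         for s in curr_stones:
--             new_stones += update_stone(s)
--         curr_stones = new_stones
--     return curr_stones
-- ===== SOURCE B (Python) =====
-- def update_stone_iter(stone, blinks):
--     # iterative depth-first expansion with an explicit stack instead of blink-by-blink levels
--     out = []
--     stack = [(stone, blinks)]
--     while stack:
--         s, b = stack.pop()
--         if b <= 0:
--             out.append(s)
--             continue
--         if s == '0':
--             children = ['1']
--         elif len(s) % 2 == 0:
--             h = len(s) // 2
--             children = [s[:h], s[h:].lstrip('0') or '0']
--         else:
--             children = [str(int(s) * 2024)]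
--         for c in reversed(children):
--             stack.append((c, b - 1))
--     return out
-- ===== Notes on version B (the rewrite author's own statement) =====
-- stated objective: alternative
-- what changed: Replaces the blink-by-blink BFS level loop (rebuild the whole stone list once per blink) with an iterative depth-first traversal using an explicit stack of (stone, remaining-blinks) pairs, appending leaves to the output and writing the zero-stripping as lstrip('0') or '0'.
-- outside the precondition, e.g. on update_stone_iter('', 2): A returns ['', '', '', ''], B returns ['', '0', '1']; on update_stone_iter('+5', 1): A returns ['+', '5'], B returns ['+', '5']
import Mathlib
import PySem

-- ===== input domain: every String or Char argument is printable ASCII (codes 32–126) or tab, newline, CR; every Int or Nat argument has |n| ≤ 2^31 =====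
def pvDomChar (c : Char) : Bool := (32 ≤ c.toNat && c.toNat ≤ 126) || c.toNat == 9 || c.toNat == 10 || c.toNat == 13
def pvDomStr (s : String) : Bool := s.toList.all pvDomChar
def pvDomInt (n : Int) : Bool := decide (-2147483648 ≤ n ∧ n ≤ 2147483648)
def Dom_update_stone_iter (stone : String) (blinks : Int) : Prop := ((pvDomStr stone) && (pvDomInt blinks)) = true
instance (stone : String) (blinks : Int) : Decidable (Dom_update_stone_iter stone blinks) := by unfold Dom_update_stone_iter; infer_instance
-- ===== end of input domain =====

-- B replaces the blink-by-blink BFS level loop with an iterative depth-first traversal over an explicit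
-- stack of (stone, remaining-blinks) pairs (same cost, different algorithm shape); return-value equivalence only.
-- ===== PORT A =====
-- A's 'while len>1 and s[0]=='0'' strip loop, on code points
def stripZeros : List Char → List Char
  | c :: c2 :: rest => if c = '0' then stripZeros (c2 :: rest) else c :: c2 :: rest
  | l => l

-- update_stone; int(stone) is PySem.Int.ofStr?, a ValueError (none) is excluded by Pre_ (getD 0 is never reached inside Pre_)
def update_stone (stone : String) : List String :=
  if stone = "0" then ["1"]
  else if PySem.Int.mod (PySem.Str.len stone) 2 = 0 then
    let mid := PySem.Int.floordiv (PySem.Str.len stone) 2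
    let first_half := PySem.Str.slice stone none (some mid)
    let second_half := PySem.Str.slice stone (some mid) none
    [first_half, String.ofList (stripZeros second_half.toList)]
  else
    [PySem.Int.toStr ((PySem.Int.ofStr? stone).getD 0 * 2024)]

def update_stone_iter (stone : String) (blinks : Int) : List String :=
  (PySem.List.pyRange 0 blinks 1).foldl
    (fun curr_stones _ => curr_stones.foldl (fun new_stones s => new_stones ++ update_stone s) [])
    [stone]

-- ===== PORT B =====
-- Source B's inline child computation: '0' rule, even split with s[h:].lstrip('0') or '0', else int*2024;
-- lstrip('0') is exact as dropWhile (= '0') on the code points, `or '0'` is the if-empty test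
def stoneChildren (s : String) : List String :=
  if s = "0" then ["1"]
  else if PySem.Int.mod (PySem.Str.len s) 2 = 0 then
    let h := PySem.Int.floordiv (PySem.Str.len s) 2
    let tail := (PySem.Str.slice s (some h) none).toList.dropWhile (· = '0')
    [PySem.Str.slice s none (some h), if tail = [] then "0" else String.ofList tail]
  else [PySem.Int.toStr ((PySem.Int.ofStr? s).getD 0 * 2024)]

theorem stoneChildren_len_le (s : String) : (stoneChildren s).length ≤ 2 := by
  unfold stoneChildren; split_ifs <;> simp

-- Source B's while-loop over the stack: Python pushes reversed(children) at the end and pops from the end,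
-- so with head-as-top the popped order is children left to right: children ++ rest
def dfsStones : List (String × Int) → List String → List String
  | [], out => out
  | (s, b) :: rest, out =>
    if b ≤ 0 then dfsStones rest (out ++ [s])
    else dfsStones ((stoneChildren s).map (fun c => (c, b - 1)) ++ rest) out
termination_by stack _ => (stack.map (fun p => 3 ^ p.2.toNat)).sum
decreasing_by
  · simp only [List.map_cons, List.sum_cons]
    have : 1 ≤ 3 ^ (b.toNat) := Nat.one_le_pow _ _ (by norm_num)
    omega
  · rename_i hb
    simp only [List.map_append, List.sum_append, List.map_cons, List.sum_cons, List.map_map]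
    have hbn : b.toNat = (b - 1).toNat + 1 := by omega
    have hconst : ((fun p : String × Int => 3 ^ p.2.toNat) ∘ (fun c : String => (c, b - 1)))
        = fun _ => 3 ^ (b - 1).toNat := rfl
    have hmap : ((stoneChildren s).map ((fun p : String × Int => 3 ^ p.2.toNat) ∘ (fun c => (c, b - 1)))).sum
        = (stoneChildren s).length * 3 ^ (b - 1).toNat := by
      rw [hconst, List.map_const', List.sum_replicate, smul_eq_mul]
    rw [hmap, hbn]
    have h2 := stoneChildren_len_le s
    have hp : 1 ≤ 3 ^ (b - 1).toNat := Nat.one_le_pow _ _ (by norm_num)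
    calc (stoneChildren s).length * 3 ^ (b - 1).toNat + (rest.map (fun p => 3 ^ p.2.toNat)).sum
        ≤ 2 * 3 ^ (b - 1).toNat + (rest.map (fun p => 3 ^ p.2.toNat)).sum := by
          exact Nat.add_le_add_right (Nat.mul_le_mul_right _ h2) _
      _ < 3 ^ ((b - 1).toNat + 1) + (rest.map (fun p => 3 ^ p.2.toNat)).sum := by
          rw [pow_succ]; omega
  
def update_stone_iter_alt (stone : String) (blinks : Int) : List String :=
  dfsStones [(stone, blinks)] []

-- ===== PRECONDITION & SPEC =====
-- Pre_ excludes (stone, blinks>0) where stone is neither a nonempty digit string nor an odd-length nonnegative int literal: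
-- such stones generally make int() raise ValueError at some blink depth (or, for the empty string, loop through A's
-- even-split branch with accidental empty halves); this closed-form safety condition slightly over-approximates,
-- excluding some shallow blink counts where A still returns (B returns the identical value there except on '').
def Pre_update_stone_iter (stone : String) (blinks : Int) : Prop :=
  0 < blinks →
    (PySem.Str.strIsdigit stone = true ∨
     (PySem.Int.mod (PySem.Str.len stone) 2 = 1 ∧
      0 ≤ (PySem.Int.ofStr? stone).getD (-1)))
instance (stone : String) (blinks : Int) : Decidable (Pre_update_stone_iter stone blinks) := by
  unfold Pre_update_stone_iter; infer_instance
def pvWitness_update_stone_iter : String × Int := ("125", 3)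

def Spec_update_stone_iter (stone : String) (blinks : Int) (out : List String) : Prop := out = update_stone_iter_alt stone blinks
instance (stone : String) (blinks : Int) (out : List String) : Decidable (Spec_update_stone_iter stone blinks out) := by unfold Spec_update_stone_iter; infer_instance

-- ===== CLAIM =====
def Claim_equal_update_stone_iter : Prop := ∀ (stone : String) (blinks : Int), Dom_update_stone_iter stone blinks → Pre_update_stone_iter stone blinks → Spec_update_stone_iter stone blinks (update_stone_iter stone blinks)

-- ===== LEMMAS AND PROOFS =====

-- proof-only helper: full expansion of one stone to depth b via B's step
def expandI (s : String) (b : Int) : List String :=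
  if b ≤ 0 then [s]
  else (stoneChildren s).flatMap (fun c => expandI c (b - 1))
termination_by b.toNat
decreasing_by omega

-- Nat.toDigits never returns [] (so str(n) is never the empty string)
theorem toDigitsCore_ne_nil (b : Nat) :
    ∀ (f n : Nat) (l : List Char), l ≠ [] → Nat.toDigitsCore b f n l ≠ [] := by
  intro f
  induction f with
  | zero => intro n l hl; simpa [Nat.toDigitsCore] using hl
  | succ m ih =>
      intro n l hl
      simp only [Nat.toDigitsCore]
      split
      · simp
      · exact ih _ _ (by simp)

theorem toChars_ne_nil (n : Int) : PySem.Int.toChars n ≠ [] := by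
  unfold PySem.Int.toChars
  split
  · simp
  · unfold Nat.toDigits
    simp only [Nat.toDigitsCore]
    split
    · simp
    · exact toDigitsCore_ne_nil _ _ _ _ (by simp)

theorem toStr_ne_empty (n : Int) : PySem.Int.toStr n ≠ "" := by
  intro h
  have h2 : (PySem.Int.toStr n).toList = [] := by rw [h]; rfl
  rw [PySem.Int.toList_toStr] at h2
  exact toChars_ne_nil n h2

theorem str_len_eq (s : String) : PySem.Str.len s = (s.toList.length : Int) := by
  simp [PySem.Str.len]

theorem mid_eq (s : String) :
    PySem.Int.floordiv (PySem.Str.len s) 2 = ((s.toList.length / 2 : Nat) : Int) := by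
  rw [str_len_eq]
  simp only [PySem.Int.floordiv, Int.fdiv_eq_ediv]
  omega

theorem first_toList (s : String) :
    (PySem.Str.slice s none (some (PySem.Int.floordiv (PySem.Str.len s) 2))).toList
      = s.toList.take (s.toList.length / 2) := by
  rw [PySem.Str.toList_slice, PySem.Chars.slice_eq_listSlice, mid_eq,
    PySem.List.slice_to_natCast]

theorem second_toList (s : String) :
    (PySem.Str.slice s (some (PySem.Int.floordiv (PySem.Str.len s) 2)) none).toList
      = s.toList.drop (s.toList.length / 2) := by
  rw [PySem.Str.toList_slice, PySem.Chars.slice_eq_listSlice, mid_eq,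
    PySem.List.slice_from_natCast]

theorem even_len (s : String) (he : PySem.Int.mod (PySem.Str.len s) 2 = 0) :
    s.toList.length % 2 = 0 := by
  rw [str_len_eq] at he
  simp only [PySem.Int.mod, Int.fmod_eq_emod] at he
  omega

theorem toList_ne_nil_of_ne_empty (s : String) (hs : s ≠ "") : s.toList ≠ [] := by
  simpa using hs

theorem second_ne_nil (s : String) (hs : s ≠ "") :
    (PySem.Str.slice s (some (PySem.Int.floordiv (PySem.Str.len s) 2)) none).toList ≠ [] := by
  have hlen1 : 1 ≤ s.toList.length :=
    List.length_pos_iff.mpr (toList_ne_nil_of_ne_empty s hs)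
  rw [second_toList]
  have hlt : s.toList.length / 2 < s.toList.length := Nat.div_lt_self (by omega) (by norm_num)
  intro hnil
  rw [List.drop_eq_nil_iff] at hnil
  omega

-- branch-unfolding lemmas for the two child computations
theorem stoneChildren_even (s : String) (h0 : ¬ s = "0")
    (he : PySem.Int.mod (PySem.Str.len s) 2 = 0) :
    stoneChildren s =
      [PySem.Str.slice s none (some (PySem.Int.floordiv (PySem.Str.len s) 2)),
       if (PySem.Str.slice s (some (PySem.Int.floordiv (PySem.Str.len s) 2)) none).toList.dropWhile (· = '0') = [] then "0"
       else String.ofList ((PySem.Str.slice s (some (PySem.Int.floordiv (PySem.Str.len s) 2)) none).toList.dropWhile (· = '0'))] := by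
  simp only [stoneChildren, if_neg h0, if_pos he]

theorem update_stone_even (s : String) (h0 : ¬ s = "0")
    (he : PySem.Int.mod (PySem.Str.len s) 2 = 0) :
    update_stone s =
      [PySem.Str.slice s none (some (PySem.Int.floordiv (PySem.Str.len s) 2)),
       String.ofList (stripZeros (PySem.Str.slice s (some (PySem.Int.floordiv (PySem.Str.len s) 2)) none).toList)] := by
  simp only [update_stone, if_neg h0, if_pos he]

-- A's strip-while loop equals lstrip('0')-or-'0' on nonempty character lists
theorem stripZeros_eq_dropWhile :
    ∀ (l : List Char), l ≠ [] →
      stripZeros l = (if l.dropWhile (· = '0') = [] then ['0'] else l.dropWhile (· = '0')) := by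
  intro l
  induction l with
  | nil => intro h; exact absurd rfl h
  | cons c t ih =>
      intro _
      cases t with
      | nil =>
          by_cases hc : c = '0' <;> simp [stripZeros, List.dropWhile, hc]
      | cons c2 r =>
          by_cases hc : c = '0'
          · rw [show stripZeros (c :: c2 :: r) = stripZeros (c2 :: r) by
              simp [stripZeros, hc]]
            rw [ih (by simp)]
            simp [List.dropWhile, hc]
          · simp [stripZeros, List.dropWhile, hc]

theorem stripZeros_ne_nil (l : List Char) (hl : l ≠ []) : stripZeros l ≠ [] := by
  rw [stripZeros_eq_dropWhile l hl]
  split_ifs with hd <;> simp [hd]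

-- the two child computations agree on every nonempty stone
theorem stoneChildren_eq_update_stone (s : String) (hs : s ≠ "") :
    stoneChildren s = update_stone s := by
  by_cases h0 : s = "0"
  · simp only [stoneChildren, update_stone, if_pos h0]
  · by_cases he : PySem.Int.mod (PySem.Str.len s) 2 = 0
    · rw [stoneChildren_even s h0 he, update_stone_even s h0 he,
        stripZeros_eq_dropWhile _ (second_ne_nil s hs)]
      by_cases hd : (PySem.Str.slice s (some (PySem.Int.floordiv (PySem.Str.len s) 2)) none).toList.dropWhile (· = '0') = []
      · rw [if_pos hd, if_pos hd]
      · rw [if_neg hd, if_neg hd]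
    · simp only [stoneChildren, update_stone, if_neg h0, if_neg he]

-- every child of a nonempty stone is nonempty
theorem update_stone_ne_empty (s : String) (hs : s ≠ "") :
    ∀ c ∈ update_stone s, c ≠ "" := by
  have hlen1 : 1 ≤ s.toList.length :=
    List.length_pos_iff.mpr (toList_ne_nil_of_ne_empty s hs)
  by_cases h0 : s = "0"
  · simp only [update_stone, if_pos h0]
    intro c hc; simp at hc; subst hc; decide
  · by_cases he : PySem.Int.mod (PySem.Str.len s) 2 = 0
    · have hlen2 : 2 ≤ s.toList.length := by
        have := even_len s he; omega
      rw [update_stone_even s h0 he]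
      intro c hc
      simp only [List.mem_cons, List.not_mem_nil, or_false] at hc
      rcases hc with hc | hc
      · subst hc
        intro hem
        have h2 : (PySem.Str.slice s none (some (PySem.Int.floordiv (PySem.Str.len s) 2))).toList = [] := by
          rw [hem]; rfl
        rw [first_toList, List.take_eq_nil_iff] at h2
        rcases h2 with h2 | h2
        · omega
        · exact toList_ne_nil_of_ne_empty s hs h2
      · subst hc
        intro hem
        have h2 : (String.ofList (stripZeros (PySem.Str.slice s (some (PySem.Int.floordiv (PySem.Str.len s) 2)) none).toList)).toList = [] := by
          rw [hem]; rfl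
        simp only [String.toList_ofList] at h2
        exact stripZeros_ne_nil _ (second_ne_nil s hs) h2
    · simp only [update_stone, if_neg h0, if_neg he]
      intro c hc
      simp at hc; subst hc
      exact toStr_ne_empty _

-- proof-only helper: full expansion of one stone to depth n via A's step
def expandStones : Nat → String → List String
  | 0, stone => [stone]
  | Nat.succ m, stone => (update_stone stone).flatMap (fun c => expandStones m c)

-- a fold that ignores the list elements is function iteration
theorem foldl_const_iterate {α β : Type} (f : α → α) :
    ∀ (l : List β) (init : α), l.foldl (fun a _ => f a) init = f^[l.length] init := by
  intro l
  induction l with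
  | nil => intro init; simp
  | cons b t ih =>
      intro init
      simp [List.foldl_cons, ih, Function.iterate_succ_apply]

-- the BFS level step iterated n times equals flat-mapping the full expansion
theorem iterate_step_eq_flatMap_expand :
    ∀ (n : Nat) (l : List String),
      (fun curr : List String => curr.foldl (fun acc s => acc ++ update_stone s) [])^[n] l
        = l.flatMap (expandStones n) := by
  intro n
  induction n with
  | zero => intro l; simp [expandStones]
  | succ m ih =>
      intro l
      rw [Function.iterate_succ_apply, ih]
      simp only [PySem.List.foldl_append_eq_flatMap, List.nil_append]
      induction l with
      | nil => simp
      | cons h t iht => simp [expandStones, List.flatMap_cons, List.flatMap_append, iht]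

-- B's DFS expansion equals A's level expansion on nonempty stones
theorem expandI_eq_expandStones :
    ∀ (n : Nat) (b : Int) (s : String), b.toNat = n → s ≠ "" →
      expandI s b = expandStones n s := by
  intro n
  induction n with
  | zero =>
      intro b s hb hs
      have hb0 : b ≤ 0 := by omega
      rw [expandI, if_pos hb0]
      rfl
  | succ m ih =>
      intro b s hb hs
      have hb0 : ¬ b ≤ 0 := by omega
      rw [expandI, if_neg hb0, stoneChildren_eq_update_stone s hs]
      show _ = (update_stone s).flatMap (fun c => expandStones m c)
      exact List.flatMap_congr (fun c hc =>
        ih (b - 1) c (by omega) (update_stone_ne_empty s hs c hc))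

-- dfsStones materialises the DFS expansion of every stack entry, left to right
theorem dfsStones_eq :
    ∀ (stack : List (String × Int)) (out : List String),
      dfsStones stack out = out ++ stack.flatMap (fun p => expandI p.1 p.2) := by
  intro stack out
  induction stack, out using dfsStones.induct with
  | case1 out => simp [dfsStones]
  | case2 s b rest out hb ih =>
      rw [dfsStones, if_pos hb, ih]
      rw [List.flatMap_cons, expandI, if_pos hb]
      simp
  | case3 s b rest out hb ih =>
      rw [dfsStones, if_neg hb, ih]
      rw [List.flatMap_cons, expandI, if_neg hb]
      simp [List.flatMap_map]

theorem update_stone_iter_spec : Claim_equal_update_stone_iter := by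
  intro stone blinks _ hpre
  unfold Spec_update_stone_iter update_stone_iter update_stone_iter_alt
  by_cases h : blinks ≤ 0
  · rw [PySem.List.pyRange_one_eq_nil h]
    simp [dfsStones, h]
  · have hne : stone ≠ "" := by
      intro he; subst he
      rcases hpre (by omega) with h1 | ⟨h2, _⟩
      · exact absurd h1 (by decide)
      · exact absurd h2 (by decide)
    rw [foldl_const_iterate, iterate_step_eq_flatMap_expand, PySem.List.length_pyRange_one]
    rw [dfsStones_eq]
    simp only [List.nil_append, List.flatMap_cons, List.flatMap_nil, List.append_nil]
    rw [expandI_eq_expandStones blinks.toNat blinks stone rfl hne]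
    simp
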